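-- pv_equiv track=rewrite | github.com/ChagnonSebastien/Advent-of-Code-2020 | Day10/10-2.py | reduceVector
-- ===== SOURCE A (Python) =====
-- def reduceVector(vector):
--     distance = vector
--     reduced = True
--     while reduced:
--         reduced = False
--         for i in range(2, max(abs(distance[0]), abs(distance[1]))+1):
--             if distance[0] % i == 0 and distance[1] % i == 0:
--                 distance = (int(distance[0]/i), int(distance[1]/i))
--                 reduced = True
--
--     return distance
-- ===== SOURCE B (Python) =====
-- def reduceVector(vector):
--     x, y = abs(vector[0]), abs(vector[1])
--     while y:
--         x, y = y, x % y
--     if x <= 1: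
--         return vector
--     return (vector[0] // x, vector[1] // x)
-- ===== Notes on version B (the rewrite author's own statement) =====
-- stated objective: faster
-- what changed: Replaced the repeated trial-division passes over all candidate divisors 2..max(|a|,|b|) with a single Euclidean-algorithm gcd followed by one exact division of each component (returning the original list unchanged when gcd<=1, as A does).
import Mathlib
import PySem

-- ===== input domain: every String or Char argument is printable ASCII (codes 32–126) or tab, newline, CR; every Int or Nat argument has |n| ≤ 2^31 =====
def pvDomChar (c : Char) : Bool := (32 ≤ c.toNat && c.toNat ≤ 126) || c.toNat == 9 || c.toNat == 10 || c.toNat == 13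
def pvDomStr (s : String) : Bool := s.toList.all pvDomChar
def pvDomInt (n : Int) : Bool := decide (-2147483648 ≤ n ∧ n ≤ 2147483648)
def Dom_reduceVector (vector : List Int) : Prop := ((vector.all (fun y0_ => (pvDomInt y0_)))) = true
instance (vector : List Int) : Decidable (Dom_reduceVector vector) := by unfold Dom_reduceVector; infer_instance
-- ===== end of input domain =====

-- B replaces A's repeated trial-division passes by one Euclidean gcd and one exact
-- division per component (objective: faster).

-- ===== PORT A =====
-- one iteration of the inner 'for i in range(...)' body; state = (distance, reduced)
def stepA (st : List Int × Bool) (i : Int) : List Int × Bool :=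
  if PySem.Int.mod (PySem.List.pyGetD st.1 0 0) i = 0 ∧
     PySem.Int.mod (PySem.List.pyGetD st.1 1 0) i = 0 then
    -- int(x/i) is truncating division (exact here: i divides x and |x| ≤ 2^31 < 2^53)
    ([PySem.Int.truncdiv (PySem.List.pyGetD st.1 0 0) i,
      PySem.Int.truncdiv (PySem.List.pyGetD st.1 1 0) i], true)
  else st

-- one full pass of the 'for' loop, starting from reduced = False
def passA (d : List Int) : List Int × Bool :=
  (PySem.List.pyRange 2 (max |PySem.List.pyGetD d 0 0| |PySem.List.pyGetD d 1 0| + 1)).foldl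
    stepA (d, false)

def measureA (d : List Int) : Nat :=
  (PySem.List.pyGetD d 0 0).natAbs + (PySem.List.pyGetD d 1 0).natAbs

-- termination lemma for loopA (cited by its decreasing_by); self-contained
theorem passA_dec (d : List Int) (h : (passA d).2 = true) :
    measureA (passA d).1 < measureA d := by
  set a := PySem.List.pyGetD d 0 0 with ha
  set b := PySem.List.pyGetD d 1 0 with hb
  have hdiv : ∀ (x i : Int), i ∣ x → PySem.Int.truncdiv x i = x / i := by
    intro x i hx
    show x.tdiv i = x / i
    rw [Int.tdiv_eq_ediv]; simp [hx]
  have hdd : ∀ (x k i : Int), 0 < k → k ∣ x → x / k / i = x / (k * i) := by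
    intro x k i hk hkx
    obtain ⟨m, rfl⟩ := hkx
    rw [Int.mul_ediv_cancel_left _ hk.ne', Int.mul_ediv_mul_of_pos _ _ hk]
  have hinv : ∀ (l : List Int), (∀ i ∈ l, 2 ≤ i) → ∀ st : List Int × Bool,
      (st = (d, false) ∨
        ∃ k : Int, 2 ≤ k ∧ k ∣ a ∧ k ∣ b ∧ st = ([a / k, b / k], true)) →
      (l.foldl stepA st = (d, false) ∨
        ∃ k : Int, 2 ≤ k ∧ k ∣ a ∧ k ∣ b ∧ l.foldl stepA st = ([a / k, b / k], true)) := by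
    intro l
    induction l with
    | nil => intro _ st hst; exact hst
    | cons i t ih =>
      intro hl st hst
      have hi : 2 ≤ i := hl i (by simp)
      rw [List.foldl_cons]
      apply ih (fun j hj => hl j (by simp [hj]))
      rcases hst with h1 | ⟨k, hk2, hka, hkb, hst⟩
      · subst h1
        unfold stepA
        simp only [← ha, ← hb]
        split
        · rename_i hc
          rw [PySem.Int.mod_eq_zero_iff_dvd, PySem.Int.mod_eq_zero_iff_dvd] at hc
          refine Or.inr ⟨i, hi, hc.1, hc.2, ?_⟩
          rw [hdiv a i hc.1, hdiv b i hc.2]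
        · exact Or.inl rfl
      · subst hst
        unfold stepA
        have e0 : PySem.List.pyGetD ([a / k, b / k], true).1 0 0 = a / k := rfl
        have e1 : PySem.List.pyGetD ([a / k, b / k], true).1 1 0 = b / k := rfl
        simp only [e0, e1]
        split
        · rename_i hc
          rw [PySem.Int.mod_eq_zero_iff_dvd, PySem.Int.mod_eq_zero_iff_dvd] at hc
          have hkpos : (0 : Int) < k := by omega
          refine Or.inr ⟨k * i, by nlinarith, ?_, ?_, ?_⟩
          · obtain ⟨m, hm⟩ := hka
            rw [hm, Int.mul_ediv_cancel_left _ hkpos.ne'] at hc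
            rw [hm]; exact mul_dvd_mul_left k hc.1
          · obtain ⟨n, hn⟩ := hkb
            rw [hn, Int.mul_ediv_cancel_left _ hkpos.ne'] at hc
            rw [hn]; exact mul_dvd_mul_left k hc.2
          · rw [hdiv _ i hc.1, hdiv _ i hc.2, hdd a k i hkpos hka, hdd b k i hkpos hkb]
        · exact Or.inr ⟨k, hk2, hka, hkb, rfl⟩
  have hab : a ≠ 0 ∨ b ≠ 0 := by
    by_contra hno
    push_neg at hno
    unfold passA at h
    rw [← ha, ← hb, hno.1, hno.2] at h
    norm_num at h
  have hres := hinv (PySem.List.pyRange 2 (max |a| |b| + 1))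
    (fun i hi => (PySem.List.mem_pyRange_one.mp hi).1) (d, false) (Or.inl rfl)
  rcases hres with h1 | ⟨k, hk2, hka, hkb, hres⟩
  · unfold passA at h
    rw [← ha, ← hb, h1] at h
    norm_num at h
  · have hres' : (passA d).1 = [a / k, b / k] := by
      unfold passA; rw [← ha, ← hb, hres]
    rw [hres']
    unfold measureA
    obtain ⟨m, hm⟩ := hka
    obtain ⟨n, hn⟩ := hkb
    have hkpos : (0 : Int) < k := by omega
    have e0 : PySem.List.pyGetD [a / k, b / k] 0 0 = a / k := rfl
    have e1 : PySem.List.pyGetD [a / k, b / k] 1 0 = b / k := rfl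
    rw [e0, e1, ← ha, ← hb, hm, hn, Int.mul_ediv_cancel_left _ hkpos.ne',
      Int.mul_ediv_cancel_left _ hkpos.ne']
    have habs1 : (k * m).natAbs = k.natAbs * m.natAbs := Int.natAbs_mul k m
    have habs2 : (k * n).natAbs = k.natAbs * n.natAbs := Int.natAbs_mul k n
    have hk2' : 2 ≤ k.natAbs := by omega
    have h1 : 2 * m.natAbs ≤ k.natAbs * m.natAbs := Nat.mul_le_mul_right _ hk2'
    have h2 : 2 * n.natAbs ≤ k.natAbs * n.natAbs := Nat.mul_le_mul_right _ hk2'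
    have hmn : m.natAbs ≠ 0 ∨ n.natAbs ≠ 0 := by
      rcases hab with h' | h'
      · left; rw [hm] at h'; simp only [ne_eq, Int.natAbs_eq_zero]; rintro rfl; simp at h'
      · right; rw [hn] at h'; simp only [ne_eq, Int.natAbs_eq_zero]; rintro rfl; simp at h'
    omega

-- the 'while reduced:' loop
def loopA (d : List Int) : List Int :=
  if h : (passA d).2 = true then loopA (passA d).1 else (passA d).1
termination_by measureA d
decreasing_by exact passA_dec d h

def reduceVector (vector : List Int) : List Int := loopA vector

-- ===== PORT B =====
-- 'while y: x, y = y, x % y'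
def gcdLoopB (x y : Int) : Int :=
  if h : y ≠ 0 then gcdLoopB y (PySem.Int.mod x y) else x
termination_by y.natAbs
decreasing_by
  rcases lt_or_gt_of_ne h with hneg | hpos
  · have := PySem.Int.mod_neg_bounds x hneg; omega
  · have h1 := PySem.Int.mod_nonneg x hpos
    have h2 := PySem.Int.mod_lt x hpos
    omega

def reduceVector_alt (vector : List Int) : List Int :=
  let g := gcdLoopB |PySem.List.pyGetD vector 0 0| |PySem.List.pyGetD vector 1 0|
  if g ≤ 1 then vector
  else [PySem.Int.floordiv (PySem.List.pyGetD vector 0 0) g,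
        PySem.Int.floordiv (PySem.List.pyGetD vector 1 0) g]

-- ===== PRECONDITION & SPEC =====
-- A raises IndexError on lists of length < 2; nothing else is excluded.
def Pre_reduceVector (vector : List Int) : Prop := 2 ≤ vector.length
instance (vector : List Int) : Decidable (Pre_reduceVector vector) := by
  unfold Pre_reduceVector; infer_instance

def pvWitness_reduceVector : List Int := [4, 6]

def Spec_reduceVector (vector : List Int) (out : List Int) : Prop := out = reduceVector_alt vector
instance (vector : List Int) (out : List Int) : Decidable (Spec_reduceVector vector out) := by
  unfold Spec_reduceVector; infer_instance

-- ===== CLAIM (what is proved, stated in full; the proofs are below) =====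
def Claim_equal_reduceVector : Prop :=
  ∀ (vector : List Int), Dom_reduceVector vector → Pre_reduceVector vector →
    Spec_reduceVector vector (reduceVector vector)

-- ===== LEMMAS AND PROOFS =====

theorem pv_truncdiv_eq_ediv_of_dvd (a i : Int) (h : i ∣ a) :
    PySem.Int.truncdiv a i = a / i := by
  show a.tdiv i = a / i
  rw [Int.tdiv_eq_ediv]; simp [h]

theorem pv_ediv_ediv_mul (a k i : Int) (hk : 0 < k) (hka : k ∣ a) :
    a / k / i = a / (k * i) := by
  obtain ⟨m, rfl⟩ := hka
  rw [Int.mul_ediv_cancel_left _ hk.ne', Int.mul_ediv_mul_of_pos _ _ hk]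

theorem stepA_true (st : List Int × Bool) (i : Int) (h : st.2 = true) :
    (stepA st i).2 = true := by
  unfold stepA; split <;> simp [h]

theorem foldA_true (l : List Int) (st : List Int × Bool) (h : st.2 = true) :
    (l.foldl stepA st).2 = true := by
  induction l generalizing st with
  | nil => exact h
  | cons i t ih => exact ih _ (stepA_true st i h)

theorem foldA_inv (a b : Int) (d : List Int)
    (ha : PySem.List.pyGetD d 0 0 = a) (hb : PySem.List.pyGetD d 1 0 = b)
    (l : List Int) (hl : ∀ i ∈ l, 2 ≤ i) (st : List Int × Bool)
    (hst : st = (d, false) ∨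
      ∃ k : Int, 2 ≤ k ∧ k ∣ a ∧ k ∣ b ∧ st = ([a / k, b / k], true)) :
    l.foldl stepA st = (d, false) ∨
      ∃ k : Int, 2 ≤ k ∧ k ∣ a ∧ k ∣ b ∧ l.foldl stepA st = ([a / k, b / k], true) := by
  induction l generalizing st with
  | nil =>
    rcases hst with h1 | ⟨k, h2, h3, h4, h5⟩
    · exact Or.inl h1
    · exact Or.inr ⟨k, h2, h3, h4, h5⟩
  | cons i t ih =>
    have hi : 2 ≤ i := hl i (by simp)
    rw [List.foldl_cons]
    apply ih (fun j hj => hl j (by simp [hj]))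
    rcases hst with h1 | ⟨k, hk2, hka, hkb, hst⟩
    · subst h1
      unfold stepA
      simp only [ha, hb]
      split
      · rename_i hc
        rw [PySem.Int.mod_eq_zero_iff_dvd, PySem.Int.mod_eq_zero_iff_dvd] at hc
        refine Or.inr ⟨i, hi, hc.1, hc.2, ?_⟩
        rw [pv_truncdiv_eq_ediv_of_dvd a i hc.1, pv_truncdiv_eq_ediv_of_dvd b i hc.2]
      · exact Or.inl rfl
    · subst hst
      unfold stepA
      have e0 : PySem.List.pyGetD ([a / k, b / k], true).1 0 0 = a / k := rfl
      have e1 : PySem.List.pyGetD ([a / k, b / k], true).1 1 0 = b / k := rfl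
      simp only [e0, e1]
      split
      · rename_i hc
        rw [PySem.Int.mod_eq_zero_iff_dvd, PySem.Int.mod_eq_zero_iff_dvd] at hc
        have hkpos : (0 : Int) < k := by omega
        refine Or.inr ⟨k * i, by nlinarith, ?_, ?_, ?_⟩
        · obtain ⟨m, rfl⟩ := hka
          rw [Int.mul_ediv_cancel_left _ hkpos.ne'] at hc
          exact mul_dvd_mul_left k hc.1
        · obtain ⟨n, rfl⟩ := hkb
          rw [Int.mul_ediv_cancel_left _ hkpos.ne'] at hc
          exact mul_dvd_mul_left k hc.2
        · rw [pv_truncdiv_eq_ediv_of_dvd _ i hc.1, pv_truncdiv_eq_ediv_of_dvd _ i hc.2,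
            pv_ediv_ediv_mul a k i hkpos hka, pv_ediv_ediv_mul b k i hkpos hkb]
      · exact Or.inr ⟨k, hk2, hka, hkb, rfl⟩

theorem foldA_fires (a b g : Int) (d : List Int)
    (ha : PySem.List.pyGetD d 0 0 = a) (hb : PySem.List.pyGetD d 1 0 = b)
    (hga : g ∣ a) (hgb : g ∣ b) (l : List Int) (hg : g ∈ l) :
    (l.foldl stepA (d, false)).2 = true := by
  induction l with
  | nil => simp at hg
  | cons i t ih =>
    rw [List.foldl_cons]
    by_cases hc : PySem.Int.mod (PySem.List.pyGetD (d, false).1 0 0) i = 0 ∧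
        PySem.Int.mod (PySem.List.pyGetD (d, false).1 1 0) i = 0
    · apply foldA_true
      unfold stepA
      rw [if_pos hc]
    · have hstep : stepA (d, false) i = (d, false) := by
        unfold stepA; rw [if_neg hc]
      rw [hstep]
      rcases List.mem_cons.mp hg with rfl | hgt
      · exfalso; apply hc
        constructor <;> rw [show (d, false).1 = d from rfl] <;>
          rw [PySem.Int.mod_eq_zero_iff_dvd]
        · rw [ha]; exact hga
        · rw [hb]; exact hgb
      · exact ih hgt

theorem passA_true (d : List Int) (h : (passA d).2 = true) :
    ∃ k : Int, 2 ≤ k ∧ k ∣ PySem.List.pyGetD d 0 0 ∧ k ∣ PySem.List.pyGetD d 1 0 ∧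
      (PySem.List.pyGetD d 0 0 ≠ 0 ∨ PySem.List.pyGetD d 1 0 ≠ 0) ∧
      (passA d).1 = [PySem.List.pyGetD d 0 0 / k, PySem.List.pyGetD d 1 0 / k] := by
  have hab : PySem.List.pyGetD d 0 0 ≠ 0 ∨ PySem.List.pyGetD d 1 0 ≠ 0 := by
    by_contra hno
    push_neg at hno
    unfold passA at h
    rw [hno.1, hno.2] at h
    norm_num at h
  have hinv := foldA_inv (PySem.List.pyGetD d 0 0) (PySem.List.pyGetD d 1 0) d rfl rfl
    (PySem.List.pyRange 2 (max |PySem.List.pyGetD d 0 0| |PySem.List.pyGetD d 1 0| + 1))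
    (fun i hi => (PySem.List.mem_pyRange_one.mp hi).1) (d, false) (Or.inl rfl)
  rcases hinv with h1 | ⟨k, hk2, hka, hkb, hres⟩
  · unfold passA at h
    rw [h1] at h
    norm_num at h
  · exact ⟨k, hk2, hka, hkb, hab, by unfold passA; rw [hres]⟩

theorem pv_gcd_div_mul (a b k : Int) (hk : 0 < k) (hka : k ∣ a) (hkb : k ∣ b) :
    Int.gcd a b = k.natAbs * Int.gcd (a / k) (b / k) := by
  obtain ⟨m, rfl⟩ := hka; obtain ⟨n, rfl⟩ := hkb
  rw [Int.mul_ediv_cancel_left _ hk.ne', Int.mul_ediv_cancel_left _ hk.ne', Int.gcd_mul_left]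

theorem loopA_eq (d : List Int) :
    loopA d =
      if (Int.gcd (PySem.List.pyGetD d 0 0) (PySem.List.pyGetD d 1 0) : Int) ≤ 1 then d
      else [PySem.List.pyGetD d 0 0 / (Int.gcd (PySem.List.pyGetD d 0 0) (PySem.List.pyGetD d 1 0) : Int),
            PySem.List.pyGetD d 1 0 / (Int.gcd (PySem.List.pyGetD d 0 0) (PySem.List.pyGetD d 1 0) : Int)] := by
  induction d using loopA.induct with
  | case1 d h ih =>
    obtain ⟨k, hk2, hka, hkb, hab, hres⟩ := passA_true d h
    set a := PySem.List.pyGetD d 0 0 with ha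
    set b := PySem.List.pyGetD d 1 0 with hb
    have hkpos : (0 : Int) < k := by omega
    rw [loopA, dif_pos h, ih, hres]
    have e0 : PySem.List.pyGetD [a / k, b / k] 0 0 = a / k := rfl
    have e1 : PySem.List.pyGetD [a / k, b / k] 1 0 = b / k := rfl
    rw [e0, e1]
    have hgcd : Int.gcd a b = k.natAbs * Int.gcd (a / k) (b / k) :=
      pv_gcd_div_mul a b k hkpos hka hkb
    have hknat : ((k.natAbs : Int)) = k := Int.natAbs_of_nonneg hkpos.le
    have hg'pos : Int.gcd (a / k) (b / k) ≠ 0 := by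
      rw [ne_eq, Int.gcd_eq_zero_iff]
      rintro ⟨h0, h1⟩
      have ha0 : a = 0 := by rw [← Int.mul_ediv_cancel' hka, h0, mul_zero]
      have hb0 : b = 0 := by rw [← Int.mul_ediv_cancel' hkb, h1, mul_zero]
      rcases hab with h' | h' <;> exact h' (by assumption)
    by_cases hone : Int.gcd (a / k) (b / k) = 1
    · rw [if_pos (show ((Int.gcd (a / k) (b / k) : Nat) : Int) <= 1 by rw [hone]; norm_num)]
      rw [hone, Nat.mul_one] at hgcd
      rw [if_neg (by rw [hgcd, hknat]; omega)]
      rw [hgcd, hknat]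
    · have hge2 : 2 ≤ Int.gcd (a / k) (b / k) := by omega
      rw [if_neg (show ¬ (((Int.gcd (a / k) (b / k) : Nat) : Int) <= 1) by push_cast; omega)]
      have hge2' : (2 : Int) ≤ ((Int.gcd (a / k) (b / k) : Nat) : Int) := by exact_mod_cast hge2
      have hglarge : ¬ ((Int.gcd a b : Int) ≤ 1) := by
        rw [hgcd, Nat.cast_mul, hknat]
        nlinarith [hk2, hge2']
      rw [if_neg hglarge]
      have hcast : ((Int.gcd a b : Nat) : Int) = k * (Int.gcd (a / k) (b / k) : Int) := by
        rw [hgcd, Nat.cast_mul, hknat]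
      rw [hcast,
        pv_ediv_ediv_mul a k _ hkpos hka, pv_ediv_ediv_mul b k _ hkpos hkb]
  | case2 d h =>
    set a := PySem.List.pyGetD d 0 0 with ha
    set b := PySem.List.pyGetD d 1 0 with hb
    have hres : passA d = (d, false) := by
      rcases foldA_inv a b d rfl rfl _
          (fun i hi => (PySem.List.mem_pyRange_one.mp hi).1) (d, false) (Or.inl rfl) with
        h1 | ⟨k, _, _, _, h5⟩
      · exact h1
      · exfalso; apply h
        show (passA d).2 = true
        unfold passA
        rw [← ha, ← hb, h5]
    have hgle : (Int.gcd a b : Int) ≤ 1 := by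
      by_contra hgt
      push_neg at hgt
      have hg2 : (2 : Int) ≤ (Int.gcd a b : Int) := by omega
      have hgda : ((Int.gcd a b : Int)) ∣ a := Int.gcd_dvd_left a b
      have hgdb : ((Int.gcd a b : Int)) ∣ b := Int.gcd_dvd_right a b
      have hab : a ≠ 0 ∨ b ≠ 0 := by
        by_contra hno; push_neg at hno
        rw [hno.1, hno.2] at hg2; simp [Int.gcd] at hg2
      have hle : (Int.gcd a b : Int) ≤ max |a| |b| := by
        rcases hab with h' | h'
        · exact le_max_of_le_left (Int.le_of_dvd (abs_pos.mpr h') ((dvd_abs _ a).mpr hgda))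
        · exact le_max_of_le_right (Int.le_of_dvd (abs_pos.mpr h') ((dvd_abs _ b).mpr hgdb))
      have hmem : ((Int.gcd a b : Int)) ∈
          PySem.List.pyRange 2 (max |a| |b| + 1) :=
        PySem.List.mem_pyRange_one.mpr ⟨hg2, by omega⟩
      have hfires := foldA_fires a b (Int.gcd a b : Int) d rfl rfl hgda hgdb _ hmem
      apply h
      show (passA d).2 = true
      unfold passA
      rw [← ha, ← hb]
      exact hfires
    rw [loopA, dif_neg h, if_pos hgle]
    have : (passA d).1 = d := by rw [hres]
    rw [this]

theorem pv_gcd_abs (a b : Int) : Int.gcd |a| |b| = Int.gcd a b := by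
  simp [Int.gcd, Int.natAbs_abs]

theorem gcdLoopB_eq (n : Nat) (x y : Int) (hn : y.natAbs ≤ n) (hx : 0 ≤ x) (hy : 0 ≤ y) :
    gcdLoopB x y = (Int.gcd x y : Int) := by
  induction n generalizing x y with
  | zero =>
    have : y = 0 := by omega
    subst this
    rw [gcdLoopB, dif_neg (by simp)]
    simp [Int.gcd, Int.natAbs_of_nonneg hx]
  | succ n ih =>
    by_cases h0 : y = 0
    · subst h0
      rw [gcdLoopB, dif_neg (by simp)]
      simp [Int.gcd, Int.natAbs_of_nonneg hx]
    · have hpos : 0 < y := lt_of_le_of_ne hy (Ne.symm h0)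
      rw [gcdLoopB, dif_pos h0]
      rw [PySem.Int.mod_eq_emod_of_pos hpos]
      have hb1 : 0 ≤ x % y := Int.emod_nonneg x h0
      have hb2 : x % y < y := Int.emod_lt_of_pos x hpos
      rw [ih y (x % y) (by omega) hy hb1]
      congr 1
      rw [Int.gcd_comm]
      exact Int.gcd_emod x y

-- ===== VERDICT (by name: the statement is the Claim_ definition above) =====
theorem reduceVector_spec : Claim_equal_reduceVector := by
  intro vector _ _
  unfold Spec_reduceVector reduceVector reduceVector_alt
  rw [loopA_eq]
  set a := PySem.List.pyGetD vector 0 0 with ha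
  set b := PySem.List.pyGetD vector 1 0 with hb
  have hg : gcdLoopB |a| |b| = (Int.gcd a b : Int) := by
    rw [gcdLoopB_eq |b|.natAbs |a| |b| le_rfl (abs_nonneg a) (abs_nonneg b)]
    rw [pv_gcd_abs]
  simp only [hg]
  split
  · rfl
  · rename_i hgt
    push_neg at hgt
    rw [PySem.Int.floordiv_eq_ediv_of_pos (by omega),
      PySem.Int.floordiv_eq_ediv_of_pos (by omega)]
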